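-- pv_equiv track=rewrite | github.com/AryaV-creator/Aryan-s-Python-Coding | Zodiac.py | zodiac
-- ===== SOURCE A (Python) =====
-- def zodiac(year,month,day):
--     years=[1998,1999,2000,2001,2002,2003,2004,2005,2006,2007,2008,2009]
--     yearZodiac={1998:"Tiger",1999:"Rabbit", 2000:"Dragon",2001:"Snake",2002:"Horse",2003:"Sheep",2004:"Monkey",2005:"Rooster", 2006:"Dog",2007:"Pig",2008:"Rat",2009:"Ox",}
--     months=["jan","feb","mar","apr","may","jun","jul","aug","sep","oct","nov","dec"]
--
--     if month in months[2: ]: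
--         for i in range(12):
--             remainder=(year-years[i])%12
--             if remainder==0:
--                 index=years[i]
--                 stringYear=str(year)
--                 listYear=list(stringYear)
--                 if listYear[3]=="0"or listYear[3]=="1":
--                     sign=f"Air {yearZodiac[index]}"
--                 elif listYear[3]=="2"or listYear[3]=="3":
--                     sign=f"Water {yearZodiac[index]}"
--                 elif listYear[3]=="4"or listYear[3]=="5":
--                     sign=f"Fire {yearZodiac[index]}"
--                 elif listYear[3]=="6"or listYear[3]=="7":
--                     sign=f"Earth {yearZodiac[index]}"
--                 elif listYear[3]=="8"or listYear[3]=="9":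
--                     sign=f"Wind {yearZodiac[index]}"
--     else:
--         if day<20:
--             year=year-1
--             for i in range(12):
--                 remainder=(year-years[i])%12
--                 if remainder==0:
--                     index=years[i]
--                     stringYear=str(year)
--                     listYear=list(stringYear)
--                     if listYear[3]=="0"or listYear[3]=="1":
--                         sign=f"Air {yearZodiac[index]}"
--                     elif listYear[3]=="2"or listYear[3]=="3":
--                         sign=f"Water {yearZodiac[index]}"
--                     elif listYear[3]=="4"or listYear[3]=="5":
--                         sign=f"Fire {yearZodiac[index]}"
--                     elif listYear[3]=="6"or listYear[3]=="7":
--                         sign=f"Earth {yearZodiac[index]}"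
--                     elif listYear[3]=="8"or listYear[3]=="9":
--                         sign=f"Wind {yearZodiac[index]}"
--     return sign
-- ===== SOURCE B (Python) =====
-- ELEMENTS = {"0": "Air", "1": "Air", "2": "Water", "3": "Water", "4": "Fire",
--             "5": "Fire", "6": "Earth", "7": "Earth", "8": "Wind", "9": "Wind"}
--
-- ZODIAC = {1998: "Tiger", 1999: "Rabbit", 2000: "Dragon", 2001: "Snake",
--           2002: "Horse", 2003: "Sheep", 2004: "Monkey", 2005: "Rooster",
--           2006: "Dog", 2007: "Pig", 2008: "Rat", 2009: "Ox"}
--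
-- NEW_YEAR_MONTHS = ("mar", "apr", "may", "jun", "jul", "aug",
--                    "sep", "oct", "nov", "dec")
--
--
-- def describe(y):
--     base = 1998 + (y - 1998) % 12
--     return f"{ELEMENTS[str(y)[3]]} {ZODIAC[base]}"
--
--
-- def zodiac(year, month, day):
--     if month in NEW_YEAR_MONTHS:
--         sign = describe(year)
--     elif day < 20:
--         sign = describe(year - 1)
--     return sign
-- ===== Notes on version B (the rewrite author's own statement) =====
-- stated objective: simpler
-- what changed: Replaces the two duplicated 12-iteration scans over the years list and the five-way elif chain by a shared describe(y) helper doing a direct closed-form lookup: base = 1998 + (y-1998) % 12 into a zodiac dict and a one-step element dict keyed by str(y)[3].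
import Mathlib
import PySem

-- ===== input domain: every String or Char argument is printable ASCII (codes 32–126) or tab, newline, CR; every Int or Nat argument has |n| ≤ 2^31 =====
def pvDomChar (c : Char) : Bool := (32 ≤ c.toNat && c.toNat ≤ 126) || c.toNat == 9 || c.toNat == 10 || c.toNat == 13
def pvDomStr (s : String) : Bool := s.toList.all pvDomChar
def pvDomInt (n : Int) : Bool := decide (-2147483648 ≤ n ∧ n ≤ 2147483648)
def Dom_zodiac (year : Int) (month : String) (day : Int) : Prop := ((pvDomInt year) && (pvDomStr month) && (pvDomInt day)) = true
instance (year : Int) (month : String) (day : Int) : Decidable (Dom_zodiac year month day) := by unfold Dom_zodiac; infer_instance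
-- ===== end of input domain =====

-- B replaces A's two duplicated 12-iteration scans and elif chains with one describe helper
-- doing base = 1998 + (year-1998) % 12 plus two dict lookups (objective: simpler); like A it
-- leaves sign unassigned (UnboundLocalError) for month outside mar..dec with day >= 20.


-- ===== PORT A =====
def pvYearsA : List Int := [1998, 1999, 2000, 2001, 2002, 2003, 2004, 2005, 2006, 2007, 2008, 2009]

def pvYearZodiacA : PySem.Dict Int String := PySem.Dict.ofList
  [(1998, "Tiger"), (1999, "Rabbit"), (2000, "Dragon"), (2001, "Snake"),
   (2002, "Horse"), (2003, "Sheep"), (2004, "Monkey"), (2005, "Rooster"),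
   (2006, "Dog"), (2007, "Pig"), (2008, "Rat"), (2009, "Ox")]

def pvMonthsA : List String :=
  ["jan", "feb", "mar", "apr", "may", "jun", "jul", "aug", "sep", "oct", "nov", "dec"]

-- the if/elif chain over listYear[3]; `none` = sign left unassigned
def pvElifA (c : Char) (z : String) : Option String :=
  if c = '0' ∨ c = '1' then some (PySem.Str.join "" ["Air ", z])
  else if c = '2' ∨ c = '3' then some (PySem.Str.join "" ["Water ", z])
  else if c = '4' ∨ c = '5' then some (PySem.Str.join "" ["Fire ", z])
  else if c = '6' ∨ c = '7' then some (PySem.Str.join "" ["Earth ", z])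
  else if c = '8' ∨ c = '9' then some (PySem.Str.join "" ["Wind ", z])
  else none

-- the body of A's `for i in range(12)` loop (sign is the running `sign` variable)
def pvBodyA (year : Int) (sign : Option String) (i : Nat) : Option String :=
  let yi := PySem.List.pyGetD pvYearsA (i : Int) 0
  if PySem.Int.mod (year - yi) 12 = 0 then
    match PySem.Str.pyGet? (PySem.Int.toStr year) 3 with
    | some c =>
        match pvElifA c ((pvYearZodiacA.get? yi).getD "") with
        | some s => some s
        | none => sign
    | none => sign
  else sign

-- the `for i in range(12)` scan (appears twice, textually identical, in A)
def pvScanA (year : Int) (sign0 : Option String) : Option String :=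
  (List.range 12).foldl (pvBodyA year) sign0

def zodiac (year : Int) (month : String) (day : Int) : String :=
  let sign : Option String :=
    if month ∈ PySem.List.slice pvMonthsA (some 2) none then
      pvScanA year none
    else if day < 20 then
      pvScanA (year - 1) none
    else none              -- sign never assigned: Python raises UnboundLocalError (outside Pre_)
  sign.getD ""

-- ===== PORT B =====
def pvElementsB : PySem.Dict Char String := PySem.Dict.ofList
  [('0', "Air"), ('1', "Air"), ('2', "Water"), ('3', "Water"), ('4', "Fire"),
   ('5', "Fire"), ('6', "Earth"), ('7', "Earth"), ('8', "Wind"), ('9', "Wind")]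

def pvZodiacB : PySem.Dict Int String := PySem.Dict.ofList
  [(1998, "Tiger"), (1999, "Rabbit"), (2000, "Dragon"), (2001, "Snake"),
   (2002, "Horse"), (2003, "Sheep"), (2004, "Monkey"), (2005, "Rooster"),
   (2006, "Dog"), (2007, "Pig"), (2008, "Rat"), (2009, "Ox")]

def pvNewYearMonthsB : List String :=
  ["mar", "apr", "may", "jun", "jul", "aug", "sep", "oct", "nov", "dec"]

-- B's describe(y): closed-form element + zodiac lookup
def pvDescribeB (y : Int) : String :=
  let base : Int := 1998 + PySem.Int.mod (y - 1998) 12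
  -- str(y)[3]; `.getD ' '` covers the IndexError/KeyError path, which lies outside Pre_
  let c : Char := (PySem.Str.pyGet? (PySem.Int.toStr y) 3).getD ' '
  PySem.Str.join " " [(pvElementsB.get? c).getD "", (pvZodiacB.get? base).getD ""]

def zodiac_alt (year : Int) (month : String) (day : Int) : String :=
  if month ∈ pvNewYearMonthsB then pvDescribeB year
  else if day < 20 then pvDescribeB (year - 1)
  else ""                  -- sign never assigned: Python raises UnboundLocalError (outside Pre_)

-- ===== PRECONDITION & SPEC =====
-- Pre_ excludes exactly the inputs where A raises: IndexError from str(y)[3] when the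
-- effective year's decimal string is shorter than 4 characters, and UnboundLocalError
-- when month is outside mar..dec and day >= 20 (B raises on the same inputs).
def Pre_zodiac (year : Int) (month : String) (day : Int) : Prop :=
  if month ∈ (["mar", "apr", "may", "jun", "jul", "aug", "sep", "oct", "nov", "dec"] : List String)
  then 1000 ≤ year ∨ year ≤ -100
  else day < 20 ∧ (1000 ≤ year - 1 ∨ year - 1 ≤ -100)
instance (year : Int) (month : String) (day : Int) : Decidable (Pre_zodiac year month day) := by
  unfold Pre_zodiac; infer_instance

def pvWitness_zodiac : Int × String × Int := (2001, "mar", 5)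

def Spec_zodiac (year : Int) (month : String) (day : Int) (out : String) : Prop := out = zodiac_alt year month day
instance (year : Int) (month : String) (day : Int) (out : String) : Decidable (Spec_zodiac year month day out) := by unfold Spec_zodiac; infer_instance

-- ===== CLAIM (what is proved, stated in full; the proofs are below) =====
def Claim_equal_zodiac : Prop := ∀ (year : Int) (month : String) (day : Int), Dom_zodiac year month day → Pre_zodiac year month day → Spec_zodiac year month day (zodiac year month day)

-- ===== LEMMAS AND PROOFS =====

-- years[j] = 1998 + j for j < 12
lemma pvYearsA_get : ∀ j : Nat, j < 12 → PySem.List.pyGetD pvYearsA (j : Int) 0 = 1998 + (j : Int) := by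
  decide

-- iterations whose remainder test fails leave `sign` unchanged
lemma pvScanA_skip (y : Int) (s : Option String) (L : List Nat)
    (h : ∀ j ∈ L, PySem.Int.mod (y - PySem.List.pyGetD pvYearsA (j : Int) 0) 12 ≠ 0) :
    L.foldl (pvBodyA y) s = s := by
  induction L generalizing s with
  | nil => rfl
  | cons a L ih =>
      have ha := h a (List.mem_cons_self)
      simp only [List.foldl_cons, pvBodyA, if_neg ha]
      exact ih s (fun j hj => h j (List.mem_cons_of_mem a hj))

-- the 12-iteration scan hits exactly the index i with (y-1998) % 12 = i
lemma pvScanA_eq (y : Int) (i : Nat) (hi : i < 12)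
    (h : PySem.Int.mod (y - 1998) 12 = (i : Int)) :
    pvScanA y none =
      (PySem.Str.pyGet? (PySem.Int.toStr y) 3).bind
        (fun c => pvElifA c ((pvYearZodiacA.get? (1998 + (i : Int))).getD "")) := by
  obtain ⟨q, hq⟩ : ∃ q, y - 1998 = 12 * q + (i : Int) :=
    ⟨PySem.Int.floordiv (y - 1998) 12, by
      have := PySem.Int.floordiv_mul_add_mod (y - 1998) 12; omega⟩
  have hcond : ∀ j : Nat, j < 12 →
      (PySem.Int.mod (y - PySem.List.pyGetD pvYearsA (j : Int) 0) 12 = 0 ↔ j = i) := by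
    intro j hj
    rw [pvYearsA_get j hj, PySem.Int.mod_eq_zero_iff_dvd]
    constructor
    · intro hd; omega
    · rintro rfl; omega
  have hsplit : List.range 12 = List.range i ++ [i] ++ (List.range (11 - i)).map (fun k => (i + 1) + k) := by
    have h12 : 12 = (i + 1) + (11 - i) := by omega
    rw [h12, List.range_add, List.range_succ]
  unfold pvScanA
  rw [hsplit, List.foldl_append, List.foldl_append]
  rw [pvScanA_skip y none (List.range i) (by
    intro j hj
    have hj' : j < i := List.mem_range.mp hj
    exact fun hz => absurd ((hcond j (by omega)).mp hz) (by omega))]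
  rw [show List.foldl (pvBodyA y) none [i] = pvBodyA y none i from rfl]
  rw [pvScanA_skip y _ _ (by
    intro j hj
    obtain ⟨k, hk, rfl⟩ := List.mem_map.mp hj
    have hk' : k < 11 - i := List.mem_range.mp hk
    exact fun hz => absurd ((hcond _ (by omega)).mp hz) (by omega))]
  unfold pvBodyA
  rw [pvYearsA_get i hi]
  rw [if_pos (show PySem.Int.mod (y - (1998 + (i : Int))) 12 = 0 from by
    rw [PySem.Int.mod_eq_zero_iff_dvd]; omega)]
  cases PySem.Str.pyGet? (PySem.Int.toStr y) 3 with
  | none => rfl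
  | some c =>
      show (match pvElifA c ((pvYearZodiacA.get? (1998 + (i : Int))).getD "") with
            | some s => some s | none => (none : Option String)) = _
      cases h' : pvElifA c ((pvYearZodiacA.get? (1998 + (i : Int))).getD "") <;> simp [h']

-- str(y) has a digit at index 3 whenever y ≥ 1000 or y ≤ -100 (|str(y)| ≥ 4)
lemma pvDigitAt3 (y : Int) (hy : 1000 ≤ y ∨ y ≤ -100) :
    ∃ c : Char, PySem.Str.pyGet? (PySem.Int.toStr y) 3 = some c ∧ c.isDigit = true := by
  have hS : PySem.Str.pyGet? (PySem.Int.toStr y) 3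
      = PySem.List.pyGet? (PySem.Int.toChars y) 3 := by
    simp [PySem.Str.pyGet?, PySem.Int.toList_toStr]
  rcases hy with hy | hy
  · have hneg : ¬ y < 0 := by omega
    have hch : PySem.Int.toChars y = Nat.toDigits 10 y.toNat := by
      simp [PySem.Int.toChars, hneg]
    have hlen : 3 < (Nat.toDigits 10 y.toNat).length := by
      by_contra hle
      have h3 := (Nat.length_toDigits_le_iff (b := 10) (n := y.toNat) (k := 3)
        (by norm_num) (by norm_num)).mp (by omega)
      norm_num at h3
      omega
    refine ⟨(Nat.toDigits 10 y.toNat)[3], ?_, ?_⟩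
    · rw [hS, hch, PySem.List.pyGet?_of_nonneg _ (by norm_num : (0:Int) ≤ 3)]
      exact List.getElem?_eq_getElem hlen
    · exact Nat.isDigit_of_mem_toDigits (by norm_num) (by norm_num) (List.getElem_mem hlen)
  · have hneg : y < 0 := by omega
    have hch : PySem.Int.toChars y = '-' :: Nat.toDigits 10 y.natAbs := by
      simp [PySem.Int.toChars, hneg]
    have hlen : 2 < (Nat.toDigits 10 y.natAbs).length := by
      by_contra hle
      have h3 := (Nat.length_toDigits_le_iff (b := 10) (n := y.natAbs) (k := 2)
        (by norm_num) (by norm_num)).mp (by omega)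
      norm_num at h3
      omega
    refine ⟨(Nat.toDigits 10 y.natAbs)[2], ?_, ?_⟩
    · rw [hS, hch, PySem.List.pyGet?_of_nonneg _ (by norm_num : (0:Int) ≤ 3)]
      exact List.getElem?_eq_getElem hlen
    · exact Nat.isDigit_of_mem_toDigits (by norm_num) (by norm_num) (List.getElem_mem hlen)

-- a digit char is one of the ten digit literals
lemma pvDigitCases (c : Char) (h : c.isDigit = true) :
    c = '0' ∨ c = '1' ∨ c = '2' ∨ c = '3' ∨ c = '4' ∨ c = '5' ∨ c = '6' ∨ c = '7' ∨ c = '8' ∨ c = '9' := by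
  have hb : 48 ≤ c.toNat ∧ c.toNat ≤ 57 := by
    simp only [Char.isDigit, Bool.and_eq_true, decide_eq_true_eq] at h
    exact ⟨UInt32.le_iff_toNat_le.mp h.1, UInt32.le_iff_toNat_le.mp h.2⟩
  have hv : c.toNat = 48 ∨ c.toNat = 49 ∨ c.toNat = 50 ∨ c.toNat = 51 ∨
      c.toNat = 52 ∨ c.toNat = 53 ∨ c.toNat = 54 ∨ c.toNat = 55 ∨
      c.toNat = 56 ∨ c.toNat = 57 := by omega
  rcases hv with hv|hv|hv|hv|hv|hv|hv|hv|hv|hv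
  · exact (Or.inl (Char.ext (UInt32.toNat_inj.mp hv)))
  · exact (Or.inr (Or.inl (Char.ext (UInt32.toNat_inj.mp hv))))
  · exact (Or.inr (Or.inr (Or.inl (Char.ext (UInt32.toNat_inj.mp hv)))))
  · exact (Or.inr (Or.inr (Or.inr (Or.inl (Char.ext (UInt32.toNat_inj.mp hv))))))
  · exact (Or.inr (Or.inr (Or.inr (Or.inr (Or.inl (Char.ext (UInt32.toNat_inj.mp hv)))))))
  · exact (Or.inr (Or.inr (Or.inr (Or.inr (Or.inr (Or.inl (Char.ext (UInt32.toNat_inj.mp hv))))))))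
  · exact (Or.inr (Or.inr (Or.inr (Or.inr (Or.inr (Or.inr (Or.inl (Char.ext (UInt32.toNat_inj.mp hv)))))))))
  · exact (Or.inr (Or.inr (Or.inr (Or.inr (Or.inr (Or.inr (Or.inr (Or.inl (Char.ext (UInt32.toNat_inj.mp hv))))))))))
  · exact (Or.inr (Or.inr (Or.inr (Or.inr (Or.inr (Or.inr (Or.inr (Or.inr (Or.inl (Char.ext (UInt32.toNat_inj.mp hv)))))))))))
  · exact (Or.inr (Or.inr (Or.inr (Or.inr (Or.inr (Or.inr (Or.inr (Or.inr (Or.inr (Char.ext (UInt32.toNat_inj.mp hv)))))))))))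

-- core: A's scan result equals B's describe(y), for any effective year y
lemma pvCore (y : Int) (hy : 1000 ≤ y ∨ y ≤ -100) :
    (pvScanA y none).getD "" = pvDescribeB y := by
  have h0 : 0 ≤ PySem.Int.mod (y - 1998) 12 := PySem.Int.mod_nonneg _ (by norm_num)
  have h12 : PySem.Int.mod (y - 1998) 12 < 12 := PySem.Int.mod_lt _ (by norm_num)
  obtain ⟨i, hi⟩ : ∃ i : Nat, PySem.Int.mod (y - 1998) 12 = (i : Int) :=
    ⟨(PySem.Int.mod (y - 1998) 12).toNat, (Int.toNat_of_nonneg h0).symm⟩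
  have hilt : i < 12 := by omega
  obtain ⟨c, hc, hcd⟩ := pvDigitAt3 y hy
  unfold pvDescribeB
  rw [hi, pvScanA_eq y i hilt hi, hc]
  simp only [Option.bind_some, Option.getD_some]
  rcases pvDigitCases c hcd with rfl|rfl|rfl|rfl|rfl|rfl|rfl|rfl|rfl|rfl <;>
    interval_cases i <;> decide

-- ===== VERDICT (by name: the statement is the Claim_ definition above) =====
theorem zodiac_spec : Claim_equal_zodiac := by
  intro year month day _ hpre
  unfold Spec_zodiac zodiac zodiac_alt
  rw [show PySem.List.slice pvMonthsA (some 2) none = pvNewYearMonthsB from by decide]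
  unfold Pre_zodiac at hpre
  by_cases hm : month ∈ pvNewYearMonthsB
  · have hm' : month ∈ (["mar", "apr", "may", "jun", "jul", "aug", "sep", "oct", "nov", "dec"] : List String) := hm
    rw [if_pos hm'] at hpre
    simp only [if_pos hm]
    exact pvCore year hpre
  · have hm' : month ∉ (["mar", "apr", "may", "jun", "jul", "aug", "sep", "oct", "nov", "dec"] : List String) := hm
    rw [if_neg hm'] at hpre
    simp only [if_neg hm, if_pos hpre.1]
    exact pvCore (year - 1) hpre.2
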